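-- pv_equiv track=rewrite | github.com/Arsen1302/Code-copy-detector | TestData/solutions/problem_1708_3_1.py | solution_1708_3_1
-- ===== SOURCE A (Python) =====
-- def solution_1708_3_1(n: int, target: int) -> int:
--     #function to get sum of the number
--     def solution_1708_3_2(n):
--         return sum([int(i) for i in str(n)])
--
--     #for the current digit place, if ones the 0, if tens then 1 as 10**1 =10
--     level=0
--     #storing ans
--     toadd=0
--     #calling function to get sum intially of n
--     sm=solution_1708_3_2(n)
--
--     #we need to loop till the sum is greater than target
--     #take example of 467
--     while(sm > target):
--         #pick the last digit
--         last = n%10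
--         #last == 464%10 => 7
--         n+=(10-last)
--         #467+=(10-7) == 470
--         n=n//10
--         #n==470//10 =>47
--         toadd+=(10**level)*(10-last)
--         #toadd= (10**0)*(10-7)=>3
--         level+=1
--         #level is now 1, for next iteration since we modified n only we need to keep
--         #track of current digit place
--         sm = solution_1708_3_2(n)
--         #check the current sum again
--     return toadd
-- ===== SOURCE B (Python) =====
-- def solution_1708_3_1(n: int, target: int) -> int:
--     # Level search: for k = 0, 1, 2, ... round n UP to the nearest multiple of
--     # 10**k via a closed-form ceiling and return the difference as soon as the
--     # digit sum of the rounded value reaches the target.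
--     k = 0
--     while True:
--         p = 10 ** k
--         rounded = -(-n // p) * p
--         if sum(int(c) for c in str(rounded)) <= target:
--             return rounded - n
--         k += 1
-- ===== Notes on version B (the rewrite author's own statement) =====
-- stated objective: alternative
-- what changed: Replaces A's digit-by-digit mutation of n with level/toadd accumulators by a level search that recomputes the rounded value from the original n with a closed-form ceiling -(-n//10**k)*10**k at each level and returns rounded - n directly.
import Mathlib
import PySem

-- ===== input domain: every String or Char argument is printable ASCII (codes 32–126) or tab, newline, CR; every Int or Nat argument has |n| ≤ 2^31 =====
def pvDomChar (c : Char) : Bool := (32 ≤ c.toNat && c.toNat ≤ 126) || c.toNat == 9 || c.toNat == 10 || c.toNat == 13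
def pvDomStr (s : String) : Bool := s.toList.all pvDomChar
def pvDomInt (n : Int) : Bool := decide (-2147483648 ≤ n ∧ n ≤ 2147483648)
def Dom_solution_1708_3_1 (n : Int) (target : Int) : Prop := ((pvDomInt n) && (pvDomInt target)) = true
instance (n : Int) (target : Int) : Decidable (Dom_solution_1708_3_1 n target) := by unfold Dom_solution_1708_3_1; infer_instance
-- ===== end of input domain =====

-- B re-implements A's round-up adjustment as a level search using a closed-form ceiling per
-- level instead of A's digit-by-digit mutation with level/toadd accumulators; same cost.

-- ===== PORT A =====
-- sum([int(i) for i in str(n)])  (A's nested helper solution_1708_3_2; B's Python has the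
-- same inline expression) — none exactly where Python's int(i) raises (the '-' of a negative n)
def pyDigitSum? (n : Int) : Option Int :=
  ((PySem.Int.toChars n).mapM (fun c => PySem.Int.ofChars? [c])).map List.sum

-- the while loop of A; fuel only makes the recursion total (Python loops forever on
-- unreachable targets — excluded by Pre_); under Pre_ the fuel is never exhausted
def aLoop (fuel : Nat) (n target : Int) (level : Nat) (toadd : Int) : Int :=
  match fuel with
  | 0 => toadd
  | fuel' + 1 =>
    match pyDigitSum? n with
    | none => toadd  -- unreachable under Pre_ (n stays ≥ 0)
    | some sm =>
      if sm > target then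
        let last := PySem.Int.mod n 10
        aLoop fuel' (PySem.Int.floordiv (n + (10 - last)) 10) target (level + 1)
          (toadd + 10 ^ level * (10 - last))
      else toadd

def solution_1708_3_1 (n : Int) (target : Int) : Int :=
  match pyDigitSum? n with
  | none => 0  -- Python raises ValueError here (n < 0); excluded by Pre_
  | some _ => aLoop (n.toNat + 1) n target 0 0

-- ===== PORT B =====
-- the k-loop of B: rounded = -(-n // 10**k) * 10**k, exit when its digit sum reaches target;
-- fuel only makes the recursion total, never exhausted under Pre_
def bLoop (fuel : Nat) (n target : Int) (k : Nat) : Int :=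
  match fuel with
  | 0 => 0
  | fuel' + 1 =>
    let p : Int := 10 ^ k
    let rounded := -(PySem.Int.floordiv (-n) p) * p
    match pyDigitSum? rounded with
    | none => 0  -- unreachable under Pre_ (rounded ≥ n ≥ 0)
    | some s => if s ≤ target then rounded - n else bLoop fuel' n target (k + 1)

def solution_1708_3_1_alt (n : Int) (target : Int) : Int :=
  bLoop (n.toNat + 1) n target 0

-- ===== PRECONDITION & SPEC =====
-- numeric digit sum, used only to STATE the precondition (the ports sum str(n))
def dsN (n : Nat) : Nat :=
  if n < 10 then n else n % 10 + dsN (n / 10)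
  decreasing_by exact Nat.div_lt_self (by omega) (by omega)

def dsZ (n : Int) : Int := (dsN n.toNat : Int)

-- Pre_ excludes n < 0 (str(n) starts with '-', so int(i) raises ValueError) and the inputs
-- where A's while loop never terminates (target < 1 while the digit sum is still above it).
def Pre_solution_1708_3_1 (n : Int) (target : Int) : Prop :=
  0 ≤ n ∧ (1 ≤ target ∨ dsZ n ≤ target)
instance (n : Int) (target : Int) : Decidable (Pre_solution_1708_3_1 n target) := by
  unfold Pre_solution_1708_3_1; infer_instance

def pvWitness_solution_1708_3_1 : Int × Int := (467, 5)

def Spec_solution_1708_3_1 (n : Int) (target : Int) (out : Int) : Prop :=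
  out = solution_1708_3_1_alt n target
instance (n : Int) (target : Int) (out : Int) : Decidable (Spec_solution_1708_3_1 n target out) := by
  unfold Spec_solution_1708_3_1; infer_instance

-- ===== CLAIM (what is proved, stated in full; the proofs are below) =====
def Claim_equal_solution_1708_3_1 : Prop :=
  ∀ (n : Int) (target : Int), Dom_solution_1708_3_1 n target →
    Pre_solution_1708_3_1 n target →
    Spec_solution_1708_3_1 n target (solution_1708_3_1 n target)

-- ===== LEMMAS AND PROOFS =====

-- dsN / dsZ basics -------------------------------------------------------------

theorem dsN_small {n : Nat} (h : n < 10) : dsN n = n := by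
  rw [dsN]; simp [h]

theorem dsN_ge10 {n : Nat} (h : 10 ≤ n) : dsN n = n % 10 + dsN (n / 10) := by
  rw [dsN]; simp [Nat.not_lt.mpr h]

theorem dsZ_natCast (m : Nat) : dsZ (m : Int) = (dsN m : Int) := by
  unfold dsZ
  norm_num

theorem dsZ_small {n : Int} (h0 : 0 ≤ n) (h : n < 10) : dsZ n = n := by
  unfold dsZ
  rw [dsN_small (by omega)]
  omega

theorem dsZ_ten_mul {x : Int} (hx : 0 ≤ x) : dsZ (10 * x) = dsZ x := by
  rcases Int.eq_ofNat_of_zero_le hx with ⟨m, rfl⟩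
  have h10 : (10 : Int) * (m : Int) = ((10 * m : Nat) : Int) := by push_cast; ring
  rw [h10, dsZ_natCast, dsZ_natCast]
  rcases Nat.eq_zero_or_pos m with hm | hm
  · simp [hm]
  · rw [dsN_ge10 (by omega)]
    have e1 : 10 * m % 10 = 0 := by omega
    have e2 : 10 * m / 10 = m := by omega
    rw [e1, e2, Nat.zero_add]

theorem dsZ_mul_pow {x : Int} (hx : 0 ≤ x) (k : Nat) : dsZ (x * 10 ^ k) = dsZ x := by
  induction k with
  | zero => simp
  | succ k ih =>
    have h : x * 10 ^ (k + 1) = 10 * (x * 10 ^ k) := by ring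
    rw [h, dsZ_ten_mul (by positivity), ih]

theorem dsZ_pow (k : Nat) : dsZ (10 ^ k) = 1 := by
  have := dsZ_mul_pow (x := 1) (by norm_num) k
  simpa [dsZ_small] using this

theorem dsZ_succ {a : Int} (ha : 0 ≤ a) (h9 : a % 10 ≠ 9) : dsZ (a + 1) = dsZ a + 1 := by
  rcases Int.eq_ofNat_of_zero_le ha with ⟨m, rfl⟩
  have hm9 : m % 10 ≠ 9 := by omega
  have h1 : ((m : Int) + 1) = ((m + 1 : Nat) : Int) := by push_cast; ring
  rw [h1, dsZ_natCast, dsZ_natCast]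
  rcases Nat.lt_or_ge m 10 with hm | hm
  · rw [dsN_small hm, dsN_small (by omega)]
    push_cast; ring
  · rw [dsN_ge10 (by omega), dsN_ge10 hm]
    have e1 : (m + 1) % 10 = m % 10 + 1 := by omega
    have e2 : (m + 1) / 10 = m / 10 := by omega
    rw [e1, e2]
    push_cast; ring

-- the digit-sum bridge: the ports' string digit sum is dsZ on n ≥ 0 ------------

def sumChars? (cs : List Char) : Option Int :=
  (cs.mapM (fun c => PySem.Int.ofChars? [c])).map List.sum

theorem sumChars?_digitChar {d : Nat} (hd : d < 10) :
    PySem.Int.ofChars? [Nat.digitChar d] = some (d : Int) := by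
  interval_cases d <;> decide

theorem sumChars?_cons {c : Char} {cs : List Char} {v : Int}
    (hc : PySem.Int.ofChars? [c] = some v) :
    sumChars? (c :: cs) = (sumChars? cs).map (fun s => v + s) := by
  unfold sumChars?
  rw [List.mapM_cons, hc]
  cases h : cs.mapM (fun c => PySem.Int.ofChars? [c]) <;> simp [List.sum_cons]

theorem sumChars?_toDigitsCore :
    ∀ (f N : Nat) (acc : List Char), N < f →
      sumChars? (Nat.toDigitsCore 10 f N acc) =
        (sumChars? acc).map (fun s => (dsN N : Int) + s) := by
  intro f
  induction f with
  | zero => intro N acc h; omega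
  | succ f ih =>
    intro N acc h
    show sumChars? (Nat.toDigitsCore 10 (f + 1) N acc) = _
    rw [Nat.toDigitsCore]
    by_cases h0 : N / 10 = 0
    · have hN : N < 10 := by omega
      simp only [h0, if_pos]
      rw [sumChars?_cons (sumChars?_digitChar (by omega : N % 10 < 10))]
      have hmod : N % 10 = N := by omega
      rw [hmod, dsN_small hN]
    · simp only [h0, if_false]
      have hf : N / 10 < f := by
        have hd1 : N / 10 < N := Nat.div_lt_self (by omega) (by omega)
        omega
      rw [ih (N / 10) _ hf]
      rw [sumChars?_cons (sumChars?_digitChar (by omega : N % 10 < 10))]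
      rw [dsN_ge10 (n := N) (by omega)]
      cases hacc : sumChars? acc
      · rfl
      · show some _ = some _
        congr 1
        push_cast
        ring

theorem pyDigitSum?_eq {n : Int} (hn : 0 ≤ n) : pyDigitSum? n = some (dsZ n) := by
  have hch : PySem.Int.toChars n = Nat.toDigits 10 n.toNat := by
    unfold PySem.Int.toChars
    rw [if_neg (by omega)]
  have : pyDigitSum? n = sumChars? (PySem.Int.toChars n) := rfl
  rw [this, hch]
  unfold Nat.toDigits
  rw [sumChars?_toDigitsCore (n.toNat + 1) n.toNat [] (by omega)]
  have : sumChars? [] = some 0 := by decide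
  rw [this]
  simp [dsZ]

-- the ceiling Rv and its characterisation --------------------------------------

def Rv (n : Int) (k : Nat) : Int := -(PySem.Int.floordiv (-n) (10 ^ k)) * 10 ^ k

theorem pow_pos10 (k : Nat) : (0 : Int) < 10 ^ k := by positivity

theorem Rv_bracket (n : Int) (k : Nat) : n ≤ Rv n k ∧ Rv n k - 10 ^ k < n := by
  have h := (PySem.Int.neg_floordiv_neg_eq_iff_of_pos (a := n) (b := 10 ^ k)
    (q := -(PySem.Int.floordiv (-n) (10 ^ k))) (pow_pos10 k)).mp rfl
  unfold Rv
  constructor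
  · nlinarith [h.2]
  · nlinarith [h.1]

theorem Rv_dvd (n : Int) (k : Nat) : (10 : Int) ^ k ∣ Rv n k := ⟨_, mul_comm _ _⟩

theorem Rv_char {n v : Int} {k : Nat} (hd : (10 : Int) ^ k ∣ v) (h1 : n ≤ v)
    (h2 : v < n + 10 ^ k) : Rv n k = v := by
  rcases hd with ⟨q, rfl⟩
  have : -(PySem.Int.floordiv (-n) (10 ^ k)) = q := by
    rw [PySem.Int.neg_floordiv_neg_eq_iff_of_pos (pow_pos10 k)]
    constructor <;> nlinarith
  unfold Rv
  rw [this]; ring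

theorem Rv_zero (n : Int) : Rv n 0 = n := by
  have := Rv_char (n := n) (v := n) (k := 0) (by simp) le_rfl (by simp)
  simpa using this

theorem Rv_nonneg {n : Int} (hn : 0 ≤ n) (k : Nat) : 0 ≤ Rv n k :=
  le_trans hn (Rv_bracket n k).1

theorem Rv_of_le_pow {n : Int} {k : Nat} (h0 : 0 < n) (h : n ≤ 10 ^ k) :
    Rv n k = 10 ^ k := by
  exact Rv_char ⟨1, (mul_one _).symm⟩ h (by omega)

theorem Rv_zero_of_zero (k : Nat) : Rv 0 k = 0 := by
  exact Rv_char (dvd_zero _) le_rfl (by have := pow_pos10 k; omega)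

-- Rv n (k+1) = 10 * Rv (ceil(n/10)) k
theorem Rv_comp (n : Int) (k : Nat) :
    Rv n (k + 1) = 10 * Rv (-(PySem.Int.floordiv (-n) 10)) k := by
  set M := -(PySem.Int.floordiv (-n) 10) with hM
  have hMb : n ≤ M * 10 ∧ (M - 1) * 10 < n := by
    have h := (PySem.Int.neg_floordiv_neg_eq_iff_of_pos (a := n) (b := 10)
      (q := M) (by norm_num)).mp rfl
    exact ⟨h.2, h.1⟩
  have hRb := Rv_bracket M k
  have hp : (10 : Int) ^ (k + 1) = 10 * 10 ^ k := by ring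
  apply Rv_char
  · rcases Rv_dvd M k with ⟨q, hq⟩
    exact ⟨q, by rw [hq]; ring⟩
  · nlinarith [hRb.1, hMb.1]
  · nlinarith [hRb.2, hMb.2]

theorem Rv_of_dvd {M : Int} {i : Nat} (hd : (10 : Int) ^ i ∣ M) : Rv M i = M :=
  Rv_char hd le_rfl (by have := pow_pos10 i; omega)

theorem Rv_succ_of_dvd {M : Int} {i : Nat} (hd : (10 : Int) ^ i ∣ M) :
    Rv (M + 1) i = M + 10 ^ i := by
  apply Rv_char
  · rcases hd with ⟨q, rfl⟩; exact ⟨q + 1, by ring⟩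
  · have := pow_pos10 i; omega
  · omega

theorem Rv_succ_of_not_dvd {M : Int} {i : Nat} (hd : ¬ (10 : Int) ^ i ∣ M) :
    Rv (M + 1) i = Rv M i := by
  have hb := Rv_bracket M i
  have hne : Rv M i ≠ M := fun h => hd (h ▸ Rv_dvd M i)
  exact Rv_char (Rv_dvd M i) (by omega) (by omega)

-- total denotations of the two loops ------------------------------------------

def AV (n target : Int) : Int :=
  if dsZ n ≤ target then 0
  else if n ≤ 1 then 0  -- unreachable under Pre_
  else (10 - n % 10) + 10 * AV (n / 10 + 1) target
  termination_by n.toNat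
  decreasing_by omega

def BV (n target : Int) (k : Nat) : Int :=
  if dsZ (Rv n k) ≤ target then Rv n k - n
  else if h : n ≤ 10 ^ k then 0  -- unreachable under Pre_
  else BV n target (k + 1)
  termination_by (n.toNat + 1) - 10 ^ k
  decreasing_by
    have h1 : (10 : Nat) ^ k < 10 ^ (k + 1) := by
      exact Nat.pow_lt_pow_succ (by omega)
    have h2 : ((10 : Nat) ^ k : Int) = (10 : Int) ^ k := by push_cast; ring
    omega

-- the loops compute their denotations (fuel adequacy) --------------------------

theorem AV_unfold {n target : Int} (hgt : ¬ dsZ n ≤ target) (hn2 : ¬ n ≤ 1) :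
    AV n target = (10 - n % 10) + 10 * AV (n / 10 + 1) target := by
  rw [AV, if_neg hgt, if_neg hn2]

theorem aLoop_eq_AV :
    ∀ (f : Nat) (n target : Int) (level : Nat) (toadd : Int), 0 ≤ n → n.toNat < f →
      (1 ≤ target ∨ dsZ n ≤ target) →
      aLoop f n target level toadd = toadd + 10 ^ level * AV n target := by
  intro f
  induction f with
  | zero => intro n target level toadd _ h _; omega
  | succ f ih =>
    intro n target level toadd hn hf hpre
    by_cases hgt : dsZ n > target
    · have ht : 1 ≤ target := by rcases hpre with h | h; exact h; omega
      have hn2 : 2 ≤ n := by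
        by_contra h
        have : dsZ n = n := dsZ_small hn (by omega)
        omega
      have hmod : PySem.Int.mod n 10 = n % 10 := PySem.Int.mod_eq_emod_of_pos (by norm_num)
      have hdiv : PySem.Int.floordiv (n + (10 - n % 10)) 10 = n / 10 + 1 := by
        rw [PySem.Int.floordiv_eq_ediv_of_pos (by norm_num)]
        omega
      have hstep : aLoop (f + 1) n target level toadd
          = aLoop f (n / 10 + 1) target (level + 1) (toadd + 10 ^ level * (10 - n % 10)) := by
        rw [aLoop, pyDigitSum?_eq hn]
        simp only [if_pos hgt, hmod, hdiv]
      have hdom : (0 : Int) ≤ n / 10 + 1 := by omega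
      have hfuel : (n / 10 + 1).toNat < f := by omega
      rw [hstep, ih (n / 10 + 1) target (level + 1) _ hdom hfuel (Or.inl ht),
        AV_unfold (n := n) (by omega) (by omega)]
      ring
    · rw [aLoop, pyDigitSum?_eq hn]
      simp only [if_neg hgt]
      rw [AV, if_pos (by omega)]
      ring

theorem bLoop_eq_BV :
    ∀ (d f k : Nat) (n target : Int), 0 ≤ n → n < 10 ^ (k + d) → d < f →
      (1 ≤ target ∨ dsZ (Rv n k) ≤ target) →
      bLoop f n target k = BV n target k := by
  intro d
  induction d with
  | zero =>
    intro f k n target hn hlt hf hpre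
    obtain ⟨f', rfl⟩ : ∃ f', f = f' + 1 := ⟨f - 1, by omega⟩
    simp only [Nat.add_zero] at hlt
    have hvalid : dsZ (Rv n k) ≤ target := by
      rcases hpre with ht | h
      · rcases eq_or_lt_of_le hn with h0 | h0
        · rw [← h0, Rv_zero_of_zero]
          rw [dsZ_small le_rfl (by norm_num)]; omega
        · rw [Rv_of_le_pow h0 (by omega), dsZ_pow]; omega
      · exact h
    simp only [bLoop]
    have hR : -PySem.Int.floordiv (-n) (10 ^ k) * 10 ^ k = Rv n k := rfl
    rw [hR, pyDigitSum?_eq (Rv_nonneg hn k)]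
    show (if dsZ (Rv n k) ≤ target then Rv n k - n else bLoop f' n target (k + 1)) = _
    rw [if_pos hvalid, BV, if_pos hvalid]
  | succ d ih =>
    intro f k n target hn hlt hf hpre
    obtain ⟨f', rfl⟩ : ∃ f', f = f' + 1 := ⟨f - 1, by omega⟩
    simp only [bLoop]
    have hR : -PySem.Int.floordiv (-n) (10 ^ k) * 10 ^ k = Rv n k := rfl
    rw [hR, pyDigitSum?_eq (Rv_nonneg hn k)]
    show (if dsZ (Rv n k) ≤ target then Rv n k - n else bLoop f' n target (k + 1)) = _
    by_cases hvalid : dsZ (Rv n k) ≤ target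
    · rw [if_pos hvalid, BV, if_pos hvalid]
    · have ht : 1 ≤ target := by
        rcases hpre with h | h; exact h; exact absurd h hvalid
      have hbig : ¬ n ≤ 10 ^ k := by
        intro hle
        apply hvalid
        rcases eq_or_lt_of_le hn with h0 | h0
        · rw [← h0, Rv_zero_of_zero, dsZ_small le_rfl (by norm_num)]; omega
        · rw [Rv_of_le_pow h0 hle, dsZ_pow]; omega
      rw [if_neg hvalid, BV, if_neg hvalid, dif_neg hbig]
      exact ih f' (k + 1) n target hn (by rw [show k + 1 + d = k + (d + 1) by ring]; exact hlt)
        (by omega) (Or.inl ht)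

-- the two key structural lemmas about B's denotation ---------------------------

-- shifting one level: the k+1 chain of n is 10 times the k chain of ceil(n/10)
theorem BV_shift :
    ∀ (d k : Nat) (n target : Int), 0 ≤ n → 1 ≤ target →
      -(PySem.Int.floordiv (-n) 10) < 10 ^ (k + d) →
      BV n target (k + 1) =
        10 * BV (-(PySem.Int.floordiv (-n) 10)) target k
          + (10 * (-(PySem.Int.floordiv (-n) 10)) - n) := by
  intro d
  induction d with
  | zero =>
    intro k n target hn ht hlt
    simp only [Nat.add_zero] at hlt
    set M := -(PySem.Int.floordiv (-n) 10) with hM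
    have hM0 : 0 ≤ M := by
      have h := (PySem.Int.neg_floordiv_neg_eq_iff_of_pos (a := n) (b := 10)
        (q := M) (by norm_num)).mp rfl
      nlinarith [h.1]
    have hvalid : dsZ (Rv M k) ≤ target := by
      rcases eq_or_lt_of_le hM0 with h0 | h0
      · rw [← h0, Rv_zero_of_zero, dsZ_small le_rfl (by norm_num)]; omega
      · rw [Rv_of_le_pow h0 (by omega), dsZ_pow]; omega
    have hcomp := Rv_comp n k
    rw [← hM] at hcomp
    have hvalid' : dsZ (Rv n (k + 1)) ≤ target := by
      rw [hcomp, dsZ_ten_mul (Rv_nonneg hM0 k)]; exact hvalid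
    rw [BV, if_pos hvalid']
    conv_rhs => rw [BV, if_pos hvalid]
    rw [hcomp]; ring
  | succ d ih =>
    intro k n target hn ht hlt
    set M := -(PySem.Int.floordiv (-n) 10) with hM
    have hbr := (PySem.Int.neg_floordiv_neg_eq_iff_of_pos (a := n) (b := 10)
      (q := M) (by norm_num)).mp rfl
    have hM0 : 0 ≤ M := by nlinarith [hbr.1]
    have hcomp := Rv_comp n k
    rw [← hM] at hcomp
    by_cases hvalid : dsZ (Rv M k) ≤ target
    · have hvalid' : dsZ (Rv n (k + 1)) ≤ target := by
        rw [hcomp, dsZ_ten_mul (Rv_nonneg hM0 k)]; exact hvalid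
      rw [BV, if_pos hvalid']
      conv_rhs => rw [BV, if_pos hvalid]
      rw [hcomp]; ring
    · have hMbig : ¬ M ≤ 10 ^ k := by
        intro hle
        apply hvalid
        rcases eq_or_lt_of_le hM0 with h0 | h0
        · rw [← h0, Rv_zero_of_zero, dsZ_small le_rfl (by norm_num)]; omega
        · rw [Rv_of_le_pow h0 hle, dsZ_pow]; omega
      have hvalid' : ¬ dsZ (Rv n (k + 1)) ≤ target := by
        rw [hcomp, dsZ_ten_mul (Rv_nonneg hM0 k)]; exact hvalid
      have hnbig : ¬ n ≤ 10 ^ (k + 1) := by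
        have : (10 : Int) ^ (k + 1) = 10 ^ k * 10 := by ring
        nlinarith [hbr.1]
      rw [BV, if_neg hvalid', dif_neg hnbig]
      conv_rhs => rw [BV, if_neg hvalid, dif_neg hMbig]
      exact ih (k + 1) n target hn ht
        (by rw [show k + 1 + d = k + (d + 1) by ring]; exact hlt)

-- exchange: when the digit sum of M is still too big, the chains of M and M+1
-- select the same rounded value
theorem BV_exch :
    ∀ (d i : Nat) (M target : Int), 0 < M → 1 ≤ target → target < dsZ M →
      M < 10 ^ (i + d) →
      BV M target i + M = BV (M + 1) target i + (M + 1) := by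
  intro d
  induction d with
  | zero =>
    intro i M target hM ht hds hlt
    simp only [Nat.add_zero] at hlt
    have h1 : Rv M i = 10 ^ i := Rv_of_le_pow hM (by omega)
    have h2 : Rv (M + 1) i = 10 ^ i := Rv_of_le_pow (by omega) (by omega)
    rw [BV, h1, if_pos (by rw [dsZ_pow]; omega)]
    conv_rhs => rw [BV, h2, if_pos (by rw [dsZ_pow]; omega)]
    ring
  | succ d ih =>
    intro i M target hM ht hds hlt
    by_cases hd : (10 : Int) ^ i ∣ M
    · -- R_M(i) = M: the M-chain must continue
      have hRM : Rv M i = M := Rv_of_dvd hd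
      have hRM1 : Rv (M + 1) i = M + 10 ^ i := Rv_succ_of_dvd hd
      have hMne : M ≠ 10 ^ i := by
        intro h
        rw [h, dsZ_pow] at hds; omega
      have hMgt : ¬ M ≤ 10 ^ i := by
        rcases hd with ⟨q, rfl⟩
        have hp := pow_pos10 i
        intro hle
        have hq : q = 1 := by nlinarith
        exact hMne (by rw [hq, mul_one])
      rw [BV, hRM, if_neg (by omega), dif_neg hMgt]
      rcases hd with ⟨q, hq⟩
      have hp := pow_pos10 i
      have hq0 : 0 < q := by nlinarith
      by_cases hv : dsZ (M + 10 ^ i) ≤ target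
      · -- M+1 chain exits with v = (q+1) * 10^i; show the M chain exits there at i+1
        have hq9 : q % 10 = 9 := by
          by_contra h9
          have hds1 : dsZ (M + 10 ^ i) = dsZ (q + 1) := by
            rw [show M + 10 ^ i = (q + 1) * 10 ^ i by rw [hq]; ring]
            exact dsZ_mul_pow (by omega) i
          have hdsM : dsZ M = dsZ q := by
            rw [hq, mul_comm]; exact dsZ_mul_pow (by omega) i
          rw [hds1, dsZ_succ (by omega) h9, ← hdsM] at hv
          omega
        have hRM2 : Rv M (i + 1) = M + 10 ^ i := by
          apply Rv_char
          · exact ⟨(q + 1) / 10, by rw [hq]; rw [pow_succ]; nlinarith [Int.mul_ediv_add_emod (q + 1) 10, show (q+1) % 10 = 0 by omega]⟩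
          · omega
          · have : (10 : Int) ^ (i + 1) = 10 ^ i * 10 := by ring
            nlinarith
        rw [BV, hRM2, if_pos hv]
        conv_rhs => rw [BV, hRM1, if_pos hv]
        ring
      · -- both chains continue to level i+1
        have hMstep : BV (M + 1) target i = BV (M + 1) target (i + 1) := by
          conv_lhs => rw [BV]
          rw [hRM1, if_neg hv, dif_neg (by omega : ¬ M + 1 ≤ 10 ^ i)]
        rw [hMstep]
        have := ih (i + 1) M target hM ht hds
          (by rw [show i + 1 + d = i + (d + 1) by ring]; exact hlt)
        omega
    · -- R_{M+1}(i) = R_M(i): the two chains test the same value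
      have hR : Rv (M + 1) i = Rv M i := Rv_succ_of_not_dvd hd
      by_cases hv : dsZ (Rv M i) ≤ target
      · rw [BV, if_pos hv]
        conv_rhs => rw [BV, hR, if_pos hv]
        ring
      · have hMgt : ¬ M ≤ 10 ^ i := by
          intro hle
          rcases lt_or_eq_of_le hle with h0 | h0
          · rw [Rv_of_le_pow hM (by omega), dsZ_pow] at hv; omega
          · exact hd (h0 ▸ ⟨1, (mul_one _).symm⟩)
        rw [BV, if_neg hv, dif_neg hMgt]
        conv_rhs => rw [BV, hR, if_neg hv, dif_neg (by omega)]
        have := ih (i + 1) M target hM ht hds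
          (by rw [show i + 1 + d = i + (d + 1) by ring]; exact hlt)
        omega

-- main equivalence of the denotations ------------------------------------------

theorem self_lt_pow {M : Int} (hM : 0 ≤ M) : M < 10 ^ (0 + M.toNat) := by
  have h := Nat.lt_pow_self (n := M.toNat) (a := 10) (by omega)
  have hc : ((10 ^ M.toNat : Nat) : Int) = (10 : Int) ^ M.toNat := by push_cast; ring
  simp only [Nat.zero_add]
  omega

theorem AV_eq_BV :
    ∀ (N : Nat) (n target : Int), n.toNat = N → 0 ≤ n →
      (1 ≤ target ∨ dsZ n ≤ target) → AV n target = BV n target 0 := by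
  intro N
  induction N using Nat.strong_induction_on with
  | _ N ih =>
    intro n target hN hn hpre
    by_cases hle : dsZ n ≤ target
    · rw [AV, if_pos hle, BV, Rv_zero, if_pos hle]
      ring
    · have ht : 1 ≤ target := by rcases hpre with h | h; exact h; exact absurd h hle
      have hn2 : 2 ≤ n := by
        by_contra h
        exact hle (by rw [dsZ_small hn (by omega)]; omega)
      set M := -(PySem.Int.floordiv (-n) 10) with hM
      have hbr := (PySem.Int.neg_floordiv_neg_eq_iff_of_pos (a := n) (b := 10)
        (q := M) (by norm_num)).mp rfl
      have hMn : M ≤ n := by nlinarith [hbr.1]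
      have hM1 : 1 ≤ M := by nlinarith [hbr.2]
      have hdpow : n < 10 ^ (0 + n.toNat) := self_lt_pow hn
      have hshift := BV_shift n.toNat 0 n target hn ht (by omega)
      rw [← hM] at hshift
      have hBn : BV n target 0 = BV n target 1 := by
        rw [BV, Rv_zero, if_neg hle, dif_neg (by norm_num; omega)]
      by_cases h10 : n % 10 = 0
      · -- M = n / 10, and exchange is needed
        have hMeq : M = n / 10 := by
          have := hbr.1; have := hbr.2; omega
        have hdsM : dsZ M = dsZ n := by
          rw [show n = 10 * M by omega]
          exact (dsZ_ten_mul (by omega)).symm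
        have hexch := BV_exch M.toNat 0 M target (by omega) ht (by omega)
          (self_lt_pow (by omega))
        have hIH : AV (M + 1) target = BV (M + 1) target 0 :=
          ih (M + 1).toNat (by omega) (M + 1) target rfl (by omega) (Or.inl ht)
        rw [AV, if_neg hle, if_neg (by omega), h10]
        rw [hBn, hshift, show n / 10 + 1 = M + 1 by omega, hIH]
        have h10M : 10 * M = n := by omega
        omega
      · -- M = n / 10 + 1 directly
        have hMeq : M = n / 10 + 1 := by
          have := hbr.1; have := hbr.2; omega
        have hIH : AV M target = BV M target 0 :=
          ih M.toNat (by omega) M target rfl (by omega) (Or.inl ht)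
        rw [AV, if_neg hle, if_neg (by omega)]
        rw [hBn, hshift, ← hMeq, hIH]
        have : 10 * M - n = 10 - n % 10 := by omega
        omega

-- ===== VERDICT (by name: the statement is the Claim_ definition above) =====
theorem solution_1708_3_1_spec : Claim_equal_solution_1708_3_1 := by
  unfold Claim_equal_solution_1708_3_1
  intro n target _ hpre
  obtain ⟨hn, hp⟩ := hpre
  unfold Spec_solution_1708_3_1
  unfold solution_1708_3_1 solution_1708_3_1_alt
  rw [pyDigitSum?_eq hn]
  rw [aLoop_eq_AV (n.toNat + 1) n target 0 0 hn (by omega) hp]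
  rw [bLoop_eq_BV n.toNat (n.toNat + 1) 0 n target hn (self_lt_pow hn) (by omega)
    (by rcases hp with h | h; exact Or.inl h; exact Or.inr (by rwa [Rv_zero]))]
  rw [AV_eq_BV n.toNat n target rfl hn hp]
  ring
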